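-- pv_equiv track=rewrite | github.com/Fusw2022/Image-AI_Major_Assignment | train_evaluate.py | seconds_to_hms2
-- ===== SOURCE A (Python) =====
-- def seconds_to_hms2(seconds):
--     seconds=int(seconds)
--     timewords=['秒','分','小时']
--     timestr=''
--     while seconds>=60 and len(timewords)>1:
--         timestr=f"{int(seconds%60)}{timewords[0]}"+timestr
--         timewords=timewords[1:]
--         seconds=seconds//60
--     timestr = f"{int(seconds)}{timewords[0]}" + timestr
--     return timestr
-- ===== SOURCE B (Python) =====
-- def seconds_to_hms2(seconds):
--     seconds = int(seconds)
--     if seconds < 60: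
--         return f"{seconds}秒"
--     minutes, s = divmod(seconds, 60)
--     if minutes < 60:
--         return f"{minutes}分{s}秒"
--     hours, m = divmod(minutes, 60)
--     return f"{hours}小时{m}分{s}秒"
-- ===== Notes on version B (the rewrite author's own statement) =====
-- stated objective: simpler
-- what changed: Replaced the list-shrinking while loop that prepends to an accumulator string with straight-line divmod arithmetic and three guarded returns, keeping no unit-word list or accumulator.
import Mathlib
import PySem

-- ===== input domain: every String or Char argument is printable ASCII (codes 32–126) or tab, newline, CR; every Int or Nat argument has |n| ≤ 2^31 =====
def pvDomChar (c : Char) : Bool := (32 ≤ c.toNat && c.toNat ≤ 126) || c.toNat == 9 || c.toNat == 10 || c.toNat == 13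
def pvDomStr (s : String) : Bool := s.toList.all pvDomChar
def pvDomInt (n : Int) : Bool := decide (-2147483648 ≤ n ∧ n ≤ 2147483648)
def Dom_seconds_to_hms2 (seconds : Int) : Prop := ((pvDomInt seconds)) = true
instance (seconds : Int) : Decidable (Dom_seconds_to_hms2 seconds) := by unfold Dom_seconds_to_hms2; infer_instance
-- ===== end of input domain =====

-- B replaces A's list-shrinking peel loop and prepend-accumulation by straight-line divmod
-- arithmetic with guarded returns (objective: simpler).

-- ===== PORT A =====
-- the while loop, recursing on the shrinking timewords list (guard: seconds>=60 and len>1)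
def hms2Loop (seconds : Int) (timewords : List String) (timestr : String) :
    Int × List String × String :=
  match timewords with
  | [] => (seconds, [], timestr)
  | w :: rest =>
    if seconds ≥ 60 ∧ rest ≠ [] then
      hms2Loop (PySem.Int.floordiv seconds 60) rest
        (PySem.Int.toStr (PySem.Int.mod seconds 60) ++ w ++ timestr)
    else (seconds, w :: rest, timestr)

def seconds_to_hms2 (seconds : Int) : String :=
  let r := hms2Loop seconds ["秒", "分", "小时"] ""
  -- timewords[0]: the list is always nonempty here, headD is exact
  PySem.Int.toStr r.1 ++ r.2.1.headD "" ++ r.2.2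

-- ===== PORT B =====
def seconds_to_hms2_alt (seconds : Int) : String :=
  if seconds < 60 then PySem.Int.toStr seconds ++ "秒"
  else
    let minutes := PySem.Int.floordiv seconds 60
    let s := PySem.Int.mod seconds 60
    if minutes < 60 then
      PySem.Int.toStr minutes ++ "分" ++ PySem.Int.toStr s ++ "秒"
    else
      let hours := PySem.Int.floordiv minutes 60
      let m := PySem.Int.mod minutes 60
      PySem.Int.toStr hours ++ "小时" ++ PySem.Int.toStr m ++ "分" ++ PySem.Int.toStr s ++ "秒"

-- ===== PRECONDITION & SPEC =====
def Spec_seconds_to_hms2 (seconds : Int) (out : String) : Prop := out = seconds_to_hms2_alt seconds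
instance (seconds : Int) (out : String) : Decidable (Spec_seconds_to_hms2 seconds out) := by unfold Spec_seconds_to_hms2; infer_instance

-- ===== CLAIM (what is proved, stated in full; the proofs are below) =====
def Claim_equal_seconds_to_hms2 : Prop := ∀ (seconds : Int), Dom_seconds_to_hms2 seconds → Spec_seconds_to_hms2 seconds (seconds_to_hms2 seconds)

-- ===== LEMMAS AND PROOFS =====

theorem fd60_lt (x : Int) (h : x < 3600) : PySem.Int.floordiv x 60 < 60 := by
  rw [PySem.Int.floordiv_lt_iff_lt_mul (by norm_num)]; omega

theorem fd60_ge (x : Int) (h : 3600 ≤ x) : 60 ≤ PySem.Int.floordiv x 60 := by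
  rw [PySem.Int.le_floordiv_iff_mul_le (by norm_num)]; omega

-- ===== VERDICT (by name: the statement is the Claim_ definition above) =====
theorem seconds_to_hms2_spec : Claim_equal_seconds_to_hms2 := by
  intro seconds _
  unfold Spec_seconds_to_hms2 seconds_to_hms2 seconds_to_hms2_alt
  by_cases h1 : seconds < 60
  · simp [hms2Loop, h1, not_le.mpr h1]
  · push Not at h1
    by_cases h2 : seconds < 3600
    · have hm := fd60_lt seconds h2
      rw [PySem.Int.floordiv_eq_ediv_of_pos (by norm_num : (0:Int) < 60)] at hm
      simp [hms2Loop, h1, hm, not_le.mpr hm, String.append_assoc]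
    · push Not at h2
      have hm := fd60_ge seconds h2
      rw [PySem.Int.floordiv_eq_ediv_of_pos (by norm_num : (0:Int) < 60)] at hm
      simp [hms2Loop, h1, hm, not_lt.mpr hm, String.append_assoc]
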